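-- pv_equiv track=rewrite | github.com/Hackathonv2/La-Quete-de-la-FiabiliteT1 | ex3/ex3.py | trouver_machine_optimale
-- ===== SOURCE A (Python) =====
-- from math import gcd
--
-- def ppcm(a, b):
--     return a * b // gcd(a, b)
--
-- def trouver_machine_optimale(n, temps_pannes):
--     ppcm_initial = temps_pannes[0]
--     for temps in temps_pannes[1:]:
--         ppcm_initial = ppcm(ppcm_initial, temps)
--
--     meilleur_retard = 0
--     indice_optimal = -1
--
--     for i, temps in enumerate(temps_pannes):
--         nouveaux_temps = temps_pannes[:i] + [temps + 1] + temps_pannes[i+1:]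
--         ppcm_nouveau = nouveaux_temps[0]
--         for t in nouveaux_temps[1:]:
--             ppcm_nouveau = ppcm(ppcm_nouveau, t)
--
--         retard = ppcm_nouveau - ppcm_initial
--         if retard > meilleur_retard:
--             meilleur_retard = retard
--             indice_optimal = i
--
--     return indice_optimal
-- ===== SOURCE B (Python) =====
-- from math import gcd
--
-- def _lcm2(a, b):
--     return a * b // gcd(a, b)
--
-- def trouver_machine_optimale(n, temps_pannes):
--     m = len(temps_pannes)
--     # prefix LCMs: pref[i] = LCM of temps_pannes[:i]  (LCM of [] is 1)
--     pref = [1]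
--     for t in temps_pannes:
--         pref.append(_lcm2(pref[-1], t))
--     # suffix LCMs built from the right: sufr[k] = LCM of the last k elements
--     sufr = [1]
--     for t in reversed(temps_pannes):
--         sufr.append(_lcm2(t, sufr[-1]))
--     suff = list(reversed(sufr))  # suff[i] = LCM of temps_pannes[i:]
--     base = pref[m]
--     meilleur_retard = 0
--     indice_optimal = -1
--     for i, t in enumerate(temps_pannes):
--         retard = _lcm2(_lcm2(pref[i], t + 1), suff[i + 1]) - base
--         if retard > meilleur_retard:
--             meilleur_retard = retard
--             indice_optimal = i
--     return indice_optimal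
-- ===== Notes on version B (the rewrite author's own statement) =====
-- stated objective: faster
-- what changed: Replaces the O(n^2) recomputation of the whole LCM chain for every candidate index by one-pass prefix and suffix LCM arrays, so each candidate's LCM is obtained from three lcm operations.
-- outside the precondition, e.g. on trouver_machine_optimale(3, [0, 0]): A raises ZeroDivisionError, B raises ZeroDivisionError; on trouver_machine_optimale(2, [0, -1]): A raises ZeroDivisionError, B raises ZeroDivisionError; on trouver_machine_optimale(0, []): A raises IndexError, B returns -1
import Mathlib
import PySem

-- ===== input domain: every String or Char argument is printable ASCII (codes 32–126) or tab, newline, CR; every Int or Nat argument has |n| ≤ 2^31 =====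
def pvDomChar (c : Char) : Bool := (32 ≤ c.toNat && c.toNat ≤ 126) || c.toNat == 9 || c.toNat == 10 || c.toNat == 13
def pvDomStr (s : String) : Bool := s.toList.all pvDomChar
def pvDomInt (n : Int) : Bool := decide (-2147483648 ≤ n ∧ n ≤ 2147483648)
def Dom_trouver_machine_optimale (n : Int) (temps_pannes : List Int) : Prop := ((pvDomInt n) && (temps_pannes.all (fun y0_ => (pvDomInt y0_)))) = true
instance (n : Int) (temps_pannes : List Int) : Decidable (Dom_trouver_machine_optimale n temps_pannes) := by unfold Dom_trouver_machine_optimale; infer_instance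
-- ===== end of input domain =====

-- B replaces A's per-index recomputation of the whole LCM chain (O(n^2) lcm
-- operations) by prefix/suffix LCM arrays built in one pass each (O(n)).

-- ===== PORT A =====
-- ppcm(a, b) = a * b // gcd(a, b)   (math.gcd is the nonnegative gcd = Int.gcd)
def ppcm (a b : Int) : Int := PySem.Int.floordiv (a * b) (Int.gcd a b)

-- "l[0] then fold ppcm over l[1:]"; the [] branch is unreachable in A
-- (temps_pannes = [] raises IndexError in Python and is excluded by Pre_).
def foldLcmHead (l : List Int) : Int :=
  match l with
  | [] => 0
  | h :: t => t.foldl ppcm h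

def trouver_machine_optimale (n : Int) (temps_pannes : List Int) : Int :=
  let ppcm_initial := foldLcmHead temps_pannes
  let r := (PySem.List.enumerate temps_pannes).foldl
    (fun (st : Int × Int) p =>
      let i := p.1
      let temps := p.2
      let nouveaux := temps_pannes.take i.toNat ++ [temps + 1] ++ temps_pannes.drop (i.toNat + 1)
      let ppcm_nouveau := foldLcmHead nouveaux
      let retard := ppcm_nouveau - ppcm_initial
      if retard > st.1 then (retard, i) else st)
    (0, -1)
  r.2

-- ===== PORT B =====
def lcm2 (a b : Int) : Int := PySem.Int.floordiv (a * b) (Int.gcd a b)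

def trouver_machine_optimale_alt (n : Int) (temps_pannes : List Int) : Int :=
  let m := temps_pannes.length
  let pref := temps_pannes.scanl lcm2 1
  let sufr := temps_pannes.reverse.scanl (fun acc t => lcm2 t acc) 1
  let suff := sufr.reverse
  let base := pref.getD m 1
  let r := (PySem.List.enumerate temps_pannes).foldl
    (fun (st : Int × Int) p =>
      let i := p.1
      let t := p.2
      let retard := lcm2 (lcm2 (pref.getD i.toNat 1) (t + 1)) (suff.getD (i.toNat + 1) 1) - base
      if retard > st.1 then (retard, i) else st)
    (0, -1)
  r.2

-- ===== PRECONDITION & SPEC =====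
-- Pre_ excludes exactly the inputs where Python A raises: the empty list
-- (IndexError on temps_pannes[0]) and lists where some LCM chain hits
-- ppcm(0, 0) (ZeroDivisionError): two zeros, or a zero together with a -1
-- (incrementing the -1 creates a second zero).
def Pre_trouver_machine_optimale (n : Int) (temps_pannes : List Int) : Prop :=
  temps_pannes ≠ [] ∧
    (temps_pannes.count 0 = 0 ∨ (temps_pannes.count 0 = 1 ∧ temps_pannes.count (-1) = 0))

instance (n : Int) (temps_pannes : List Int) : Decidable (Pre_trouver_machine_optimale n temps_pannes) := by
  unfold Pre_trouver_machine_optimale; infer_instance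

def pvWitness_trouver_machine_optimale : Int × List Int := (3, [2, 3, 4])

def Spec_trouver_machine_optimale (n : Int) (temps_pannes : List Int) (out : Int) : Prop := out = trouver_machine_optimale_alt n temps_pannes
instance (n : Int) (temps_pannes : List Int) (out : Int) : Decidable (Spec_trouver_machine_optimale n temps_pannes out) := by unfold Spec_trouver_machine_optimale; infer_instance

-- ===== CLAIM (what is proved, stated in full; the proofs are below) =====
def Claim_equal_trouver_machine_optimale : Prop := ∀ (n : Int) (temps_pannes : List Int), Dom_trouver_machine_optimale n temps_pannes → Pre_trouver_machine_optimale n temps_pannes → Spec_trouver_machine_optimale n temps_pannes (trouver_machine_optimale n temps_pannes)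

-- ===== LEMMAS AND PROOFS =====

-- closed form: a * b // gcd(a, b) = sign(a) * sign(b) * lcm(|a|, |b|)
theorem ppcm_closed (a b : Int) :
    ppcm a b = a.sign * b.sign * (Int.lcm a b : Int) := by
  rcases eq_or_ne a 0 with rfl | ha
  · simp [ppcm, PySem.Int.floordiv, Int.zero_fdiv]
  rcases eq_or_ne b 0 with rfl | hb
  · simp [ppcm, PySem.Int.floordiv, Int.zero_fdiv]
  have hg : (Int.gcd a b : Int) ≠ 0 := by
    simp [Int.gcd_eq_zero_iff, ha, hb]
  have hab : a * b = (Int.gcd a b : Int) * (a.sign * b.sign * (Int.lcm a b : Int)) := by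
    have h1 : a = a.sign * a.natAbs := (Int.sign_mul_natAbs a).symm
    have h2 : b = b.sign * b.natAbs := (Int.sign_mul_natAbs b).symm
    have h3 : (a.natAbs * b.natAbs : Nat) = Int.gcd a b * Int.lcm a b :=
      (Nat.gcd_mul_lcm _ _).symm
    calc a * b = (a.sign * b.sign) * ((a.natAbs * b.natAbs : Nat) : Int) := by
          conv_lhs => rw [h1, h2]
          push_cast; ring
      _ = (Int.gcd a b : Int) * (a.sign * b.sign * (Int.lcm a b : Int)) := by
          rw [h3]; push_cast; ring
  rw [ppcm, PySem.Int.floordiv, hab, Int.mul_fdiv_cancel_left _ hg]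

theorem ppcm_zero_left (b : Int) : ppcm 0 b = 0 := by simp [ppcm_closed]

theorem ppcm_zero_right (a : Int) : ppcm a 0 = 0 := by simp [ppcm_closed]

theorem ppcm_one_left (b : Int) : ppcm 1 b = b := by
  simp [ppcm_closed, Int.lcm, Int.sign_mul_abs]

theorem ppcm_one_right (a : Int) : ppcm a 1 = a := by
  simp [ppcm_closed, Int.lcm, Int.sign_mul_abs]

theorem sign_natAbs_aux (a b : Int) (ha : a ≠ 0) (hb : b ≠ 0) :
    (a.sign * b.sign * (Int.lcm a b : Int)).sign = a.sign * b.sign ∧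
    (a.sign * b.sign * (Int.lcm a b : Int)).natAbs = Nat.lcm a.natAbs b.natAbs := by
  have hl : 0 < Int.lcm a b :=
    Nat.pos_of_ne_zero (Nat.lcm_ne_zero (Int.natAbs_ne_zero.mpr ha) (Int.natAbs_ne_zero.mpr hb))
  have hsa : a.sign.natAbs = 1 := Int.natAbs_sign_of_ne_zero ha
  have hsb : b.sign.natAbs = 1 := Int.natAbs_sign_of_ne_zero hb
  constructor
  · rw [Int.sign_mul, Int.sign_mul, Int.sign_sign, Int.sign_sign,
      show ((Int.lcm a b : Int)).sign = 1 from Int.sign_eq_one_of_pos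
        (by exact_mod_cast hl)]
    ring
  · rw [Int.natAbs_mul, Int.natAbs_mul, hsa, hsb, Int.natAbs_natCast]
    simp [Int.lcm]

theorem ppcm_assoc (a b c : Int) : ppcm (ppcm a b) c = ppcm a (ppcm b c) := by
  rcases eq_or_ne a 0 with rfl | ha
  · simp [ppcm_zero_left]
  rcases eq_or_ne b 0 with rfl | hb
  · simp [ppcm_zero_left, ppcm_zero_right]
  rcases eq_or_ne c 0 with rfl | hc
  · simp [ppcm_zero_right]
  obtain ⟨hsab, habs_ab⟩ := sign_natAbs_aux a b ha hb
  obtain ⟨hsbc, habs_bc⟩ := sign_natAbs_aux b c hb hc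
  rw [ppcm_closed a b, ppcm_closed b c, ppcm_closed, ppcm_closed, hsab, hsbc]
  simp only [Int.lcm] at *
  rw [habs_ab, habs_bc, Nat.lcm_assoc]
  ring

-- the "LCM of a list" with neutral element 1
def lcmList (l : List Int) : Int := l.foldl ppcm 1

theorem foldl_ppcm_eq (l : List Int) (a : Int) :
    l.foldl ppcm a = ppcm a (lcmList l) := by
  induction l generalizing a with
  | nil => simp [lcmList, ppcm_one_right]
  | cons x t ih =>
    simp only [lcmList, List.foldl_cons, ppcm_one_left] at *
    rw [ih (ppcm a x), ih x, ppcm_assoc]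

theorem lcmList_cons (x : Int) (l : List Int) :
    lcmList (x :: l) = ppcm x (lcmList l) := by
  simp only [lcmList, List.foldl_cons, ppcm_one_left]
  exact foldl_ppcm_eq l x

theorem lcmList_append (l₁ l₂ : List Int) :
    lcmList (l₁ ++ l₂) = ppcm (lcmList l₁) (lcmList l₂) := by
  simp only [lcmList, List.foldl_append]
  exact foldl_ppcm_eq l₂ _

theorem foldLcmHead_eq (l : List Int) (h : l ≠ []) : foldLcmHead l = lcmList l := by
  cases l with
  | nil => exact absurd rfl h
  | cons x t => simp [foldLcmHead, lcmList, ppcm_one_left]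

theorem lcmList_foldr (l : List Int) : l.foldr ppcm 1 = lcmList l := by
  induction l with
  | nil => rfl
  | cons x t ih => rw [List.foldr_cons, ih, lcmList_cons]

-- getD of scanl is the fold of the prefix
theorem getD_reverse (l : List Int) (j : Nat) (h : j < l.length) (d : Int) :
    l.reverse.getD j d = l.getD (l.length - 1 - j) d := by
  rw [List.getD_eq_getElem _ _ (by simpa using h), List.getElem_reverse,
    List.getD_eq_getElem _ _ (by omega)]

theorem scanl_getD {α : Type} (f : Int → α → Int) (b : Int) (l : List α) (i : Nat)
    (h : i ≤ l.length) (d : Int) :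
    (List.scanl f b l).getD i d = (l.take i).foldl f b := by
  induction l generalizing b i with
  | nil => simp [Nat.le_zero.mp (by simpa using h), List.scanl]
  | cons x t ih =>
    cases i with
    | zero => simp [List.scanl]
    | succ j =>
      simp only [List.scanl, List.getD, List.take_succ_cons, List.foldl_cons]
      simpa using ih (f b x) j (by simpa using h)

-- the suffix array of B: entry j is the LCM of the elements from j on
theorem suff_getD (xs : List Int) (j : Nat) (h : j ≤ xs.length) :
    ((xs.reverse.scanl (fun acc t => lcm2 t acc) 1).reverse).getD j 1
      = lcmList (xs.drop j) := by
  have hlen : (xs.reverse.scanl (fun acc t => lcm2 t acc) 1).length = xs.length + 1 := by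
    simp
  rw [getD_reverse _ _ (by rw [hlen]; omega) 1, hlen]
  have hidx : xs.length + 1 - 1 - j = xs.length - j := by omega
  rw [hidx, scanl_getD _ _ _ _ (by simp) 1]
  have htake : xs.reverse.take (xs.length - j) = (xs.drop j).reverse := by
    rw [List.take_reverse]
    congr 2
    omega
  rw [htake, List.foldl_reverse]
  exact lcmList_foldr _

-- A's modified-list LCM equals B's three-lcm combination
theorem key_value (xs : List Int) (k : Nat) (hk : k < xs.length) :
    lcmList (xs.take k ++ [xs[k] + 1] ++ xs.drop (k + 1))
      = ppcm (ppcm (lcmList (xs.take k)) (xs[k] + 1)) (lcmList (xs.drop (k + 1))) := by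
  rw [lcmList_append, lcmList_append]
  have h1 : lcmList [xs[k] + 1] = xs[k] + 1 := by
    simp [lcmList, ppcm_one_left]
  rw [h1]

-- ===== VERDICT (by name: the statement is the Claim_ definition above) =====
theorem trouver_machine_optimale_spec : Claim_equal_trouver_machine_optimale := by
  intro n xs _hdom hpre
  obtain ⟨hne, -⟩ := hpre
  unfold Spec_trouver_machine_optimale trouver_machine_optimale trouver_machine_optimale_alt
  dsimp only
  congr 1
  apply PySem.List.foldl_congr_mem
  intro acc p hp
  obtain ⟨k, hk, rfl⟩ := (PySem.List.mem_enumerate_iff xs 0 p).mp hp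
  dsimp only
  have htn : ((0 : Int) + (k : Int)).toNat = k := by omega
  rw [htn]
  have hbase : (xs.scanl lcm2 1).getD xs.length 1 = foldLcmHead xs := by
    rw [scanl_getD _ _ _ _ (le_refl _) 1, List.take_length, foldLcmHead_eq xs hne]
    rfl
  have hpref : (xs.scanl lcm2 1).getD k 1 = lcmList (xs.take k) := by
    rw [scanl_getD _ _ _ _ (le_of_lt hk) 1]; rfl
  have hsuf := suff_getD xs (k + 1) (by omega)
  have hval : foldLcmHead (xs.take k ++ [xs[k] + 1] ++ xs.drop (k + 1))
      = lcm2 (lcm2 ((xs.scanl lcm2 1).getD k 1) (xs[k] + 1))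
          (((xs.reverse.scanl (fun acc t => lcm2 t acc) 1).reverse).getD (k + 1) 1) := by
    rw [foldLcmHead_eq _ (by simp), key_value xs k hk, hpref, hsuf]; rfl
  rw [hbase, hval]
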